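-- pv_equiv track=rewrite | github.com/kmanu225/cryptoword | algorithms/classical/vigenere/utils.py | find_ngrams_distances
-- ===== SOURCE A (Python) =====
-- def find_ngrams_distances(text, n):
--     """
--     Finds the distances between repeated n-grams (substrings of length `n`) in the text.
--
--     Args:
--         text (str): The input text.
--         n (int): The length of the n-grams to consider.
--
--     Returns:
--         list: A list of the distances between repeated n-grams.
--     """
--     ngrams = {}
--     for i in range(len(text) - n + 1):
--         ngram = text[i : i + n]
--         if ngram in ngrams:
--             ngrams[ngram].append(i)
--         else:
--             ngrams[ngram] = [i]
--
--     multiple_ngrams = {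
--         key: [ngrams[key][i + 1] - ngrams[key][i] for i in range(len(ngrams[key]) - 1)]
--         for key, value in ngrams.items()
--         if len(value) > 1
--     }
--
--     distances = []
--     for value in multiple_ngrams.values():
--         distances += value
--
--     distances.sort()
--     return distances
-- ===== SOURCE B (Python) =====
-- def find_ngrams_distances(text, n):
--     """Single pass: remember only the last index of each n-gram and emit
--     the gap to the previous occurrence immediately; then sort."""
--     last = {}
--     distances = []
--     for i in range(len(text) - n + 1):
--         ngram = text[i : i + n]
--         if ngram in last:
--             distances.append(i - last[ngram])
--         last[ngram] = i
--     distances.sort()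
--     return distances
-- ===== Notes on version B (the rewrite author's own statement) =====
-- stated objective: simpler
-- what changed: Replaces A's three phases (group all positions per n-gram into lists, a dict comprehension computing consecutive differences per key, then flattening) by one pass that keeps only the last index of each n-gram and appends each gap immediately; then sorts.
import Mathlib
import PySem

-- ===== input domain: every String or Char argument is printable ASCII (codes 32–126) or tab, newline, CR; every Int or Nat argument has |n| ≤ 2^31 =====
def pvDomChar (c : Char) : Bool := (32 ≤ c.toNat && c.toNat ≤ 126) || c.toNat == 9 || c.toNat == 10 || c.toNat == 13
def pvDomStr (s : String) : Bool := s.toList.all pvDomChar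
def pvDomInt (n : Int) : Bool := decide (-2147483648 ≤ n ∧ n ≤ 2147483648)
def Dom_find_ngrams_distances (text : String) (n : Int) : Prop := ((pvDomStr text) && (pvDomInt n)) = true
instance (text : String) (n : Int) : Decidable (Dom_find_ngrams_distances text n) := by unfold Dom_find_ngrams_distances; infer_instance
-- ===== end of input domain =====

-- B replaces A's group-positions-then-diff-then-flatten phases by one pass keeping only each
-- n-gram's last index and emitting each gap immediately (objective: simpler).

-- ===== PORT A =====
-- [ngrams[key][i+1] - ngrams[key][i] for i in range(len(ngrams[key]) - 1)]
-- (pyGetD with default 0 is exact here: every index produced by the range is in bounds)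
def pyDiffsA (l : List Int) : List Int :=
  (PySem.List.pyRange 0 ((l.length : Int) - 1)).map
    (fun i => PySem.List.pyGetD l (i + 1) 0 - PySem.List.pyGetD l i 0)

-- loop body of A's first pass: if ngram in ngrams: append i, else start [i]
def stepA (cs : List Char) (n : Int) (d : PySem.Dict (List Char) (List Int)) (i : Int) :
    PySem.Dict (List Char) (List Int) :=
  d.insert (PySem.List.slice cs (some i) (some (i + n)))
    (match d.get? (PySem.List.slice cs (some i) (some (i + n))) with
     | some l => l ++ [i]
     | none => [i])

def find_ngrams_distances (text : String) (n : Int) : List Int :=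
  let cs := text.toList
  let ngrams := (PySem.List.pyRange 0 ((cs.length : Int) - n + 1)).foldl (stepA cs n) PySem.Dict.empty
  let multiple :=
    ngrams.items.foldl
      (fun (d : PySem.Dict (List Char) (List Int)) p =>
        if 1 < p.2.length then d.insert p.1 (pyDiffsA p.2) else d)
      PySem.Dict.empty
  let distances := multiple.values.foldl (fun acc v => acc ++ v) []
  PySem.List.sorted distances (fun x => x)

-- ===== PORT B =====
-- loop body of B: if ngram in last: emit i - last[ngram]; last[ngram] = i
def stepB (cs : List Char) (n : Int) (st : PySem.Dict (List Char) Int × List Int) (i : Int) :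
    PySem.Dict (List Char) Int × List Int :=
  let g := PySem.List.slice cs (some i) (some (i + n))
  (st.1.insert g i,
   match st.1.get? g with
   | some j => st.2 ++ [i - j]
   | none => st.2)

def find_ngrams_distances_alt (text : String) (n : Int) : List Int :=
  let cs := text.toList
  let st := (PySem.List.pyRange 0 ((cs.length : Int) - n + 1)).foldl (stepB cs n) (PySem.Dict.empty, [])
  PySem.List.sorted st.2 (fun x => x)

-- ===== PRECONDITION & SPEC =====
def Spec_find_ngrams_distances (text : String) (n : Int) (out : List Int) : Prop := out = find_ngrams_distances_alt text n
instance (text : String) (n : Int) (out : List Int) : Decidable (Spec_find_ngrams_distances text n out) := by unfold Spec_find_ngrams_distances; infer_instance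

-- ===== CLAIM (what is proved, stated in full; the proofs are below) =====
def Claim_equal_find_ngrams_distances : Prop := ∀ (text : String) (n : Int), Dom_find_ngrams_distances text n → Spec_find_ngrams_distances text n (find_ngrams_distances text n)

-- ===== LEMMAS AND PROOFS =====

-- multiset of all pairwise-consecutive gaps recorded in an items list
def msum (its : List (List Char × List Int)) : Multiset Int :=
  (its.map (fun p => ((pyDiffsA p.2 : List Int) : Multiset Int))).sum

-- B's last-index entry is the last element of A's position list, key by key
def relLast (o1 : Option (List Int)) (o2 : Option Int) : Prop :=
  match o1, o2 with
  | none, none => True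
  | some l, some j => l.getLast? = some j
  | _, _ => False

def LoopInv (dA : PySem.Dict (List Char) (List Int)) (dB : PySem.Dict (List Char) Int)
    (acc : List Int) : Prop :=
  dA.keys.Nodup ∧ (∀ k, relLast (dA.get? k) (dB.get? k)) ∧ ((acc : Multiset Int) = msum dA.items)

theorem pyDiffsA_short (l : List Int) (h : l.length ≤ 1) : pyDiffsA l = [] := by
  match l, h with
  | [], _ => rfl
  | [a], _ => rfl

theorem pyDiffsA_append (l : List Int) (j i : Int) (h : l.getLast? = some j) :
    pyDiffsA (l ++ [i]) = pyDiffsA l ++ [i - j] := by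
  have hne : l ≠ [] := by intro hnil; rw [hnil] at h; simp at h
  have hlen : 1 ≤ l.length := List.length_pos_iff.mpr hne
  have hcast : ((l ++ [i]).length : Int) - 1 = ((l.length - 1 : Nat) : Int) + 1 := by
    simp; omega
  unfold pyDiffsA
  rw [hcast, PySem.List.pyRange_one_succ_right (by positivity), List.map_append]
  congr 1
  · have hcast2 : ((l.length : Int) - 1) = ((l.length - 1 : Nat) : Int) := by omega
    rw [hcast2, PySem.List.pyRange_zero_natCast]
    apply List.map_congr_left
    intro x hx
    obtain ⟨k, hk, rfl⟩ := List.mem_map.mp hx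
    have hk' : k < l.length - 1 := List.mem_range.mp hk
    have h1 : ((k : Int) + 1) = ((k + 1 : Nat) : Int) := by push_cast; ring
    rw [h1, PySem.List.pyGetD_natCast, PySem.List.pyGetD_natCast,
        PySem.List.pyGetD_natCast, PySem.List.pyGetD_natCast,
        List.getD_append _ _ _ _ (by omega), List.getD_append _ _ _ _ (by omega)]
  · simp only [List.map_cons, List.map_nil]
    congr 1
    have h1 : ((l.length - 1 : Nat) : Int) + 1 = ((l.length : Nat) : Int) := by omega
    rw [h1, PySem.List.pyGetD_natCast, PySem.List.pyGetD_natCast]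
    have h2 : (l ++ [i]).getD l.length 0 = i := by
      simp [List.getD]
    have h3 : (l ++ [i]).getD (l.length - 1) 0 = j := by
      rw [List.getD_append _ _ _ _ (by omega)]
      rw [List.getLast?_eq_getElem?] at h
      simp [List.getD, h]
    rw [h2, h3]

theorem msum_append (a b : List (List Char × List Int)) : msum (a ++ b) = msum a + msum b := by
  simp [msum]

theorem map_ite_id (its : List (List Char × List Int)) (g : List Char) (w : List Int)
    (hg : g ∉ its.map Prod.fst) :
    its.map (fun p => if (p.1 == g) = true then (g, w) else p) = its := by
  induction its with
  | nil => rfl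
  | cons p t ih =>
    simp only [List.map_cons, List.mem_cons, not_or] at hg ⊢
    rw [if_neg (by simp; exact fun hpg => hg.1 (by simp [hpg])), ih hg.2]

theorem msum_update (its : List (List Char × List Int)) (g : List Char) (l w : List Int)
    (hnd : (its.map Prod.fst).Nodup) (hm : (g, l) ∈ its) :
    msum (its.map (fun p => if (p.1 == g) = true then (g, w) else p)) + (pyDiffsA l : Multiset Int)
      = msum its + (pyDiffsA w : Multiset Int) := by
  induction its with
  | nil => simp at hm
  | cons p t ih =>
    simp only [List.map_cons, List.nodup_cons] at hnd
    rcases List.mem_cons.mp hm with h | h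
    · subst h
      rw [List.map_cons]
      have hh : (if (((g, l) : List Char × List Int).1 == g) = true then (g, w) else (g, l)) = (g, w) := by simp
      rw [hh, map_ite_id t g w hnd.1]
      simp only [msum, List.map_cons, List.sum_cons]
      abel
    · have hpg : p.1 ≠ g := fun he => hnd.1 (List.mem_map.mpr ⟨(g, l), h, he.symm⟩)
      rw [List.map_cons]
      have hh : (if (p.1 == g) = true then (g, w) else p) = p := by simp [hpg]
      rw [hh]
      simp only [msum, List.map_cons, List.sum_cons]
      have hih := ih hnd.2 h
      simp only [msum] at hih
      rw [add_assoc, add_assoc, hih]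

theorem inv_step (cs : List Char) (n : Int) (dA : PySem.Dict (List Char) (List Int))
    (dB : PySem.Dict (List Char) Int) (acc : List Int) (i : Int) (h : LoopInv dA dB acc) :
    LoopInv (stepA cs n dA i) (stepB cs n (dB, acc) i).1 (stepB cs n (dB, acc) i).2 := by
  obtain ⟨hnd, hrel, hacc⟩ := h
  set g := PySem.List.slice cs (some i) (some (i + n)) with hg
  have hrg := hrel g
  cases hA : dA.get? g with
  | none =>
    have hB : dB.get? g = none := by
      cases hB : dB.get? g with
      | none => rfl
      | some j => rw [hA, hB] at hrg; exact absurd hrg (by simp [relLast])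
    have hcon : dA.contains g = false := (PySem.Dict.get?_eq_none_iff_contains dA g).mp hA
    refine ⟨?_, ?_, ?_⟩
    · exact PySem.Dict.nodup_keys_insert _ _ _ hnd
    · intro k
      simp only [stepA, stepB, ← hg, hA, hB]
      rw [PySem.Dict.get?_insert, PySem.Dict.get?_insert]
      by_cases hk : k = g
      · simp [hk, relLast]
      · simp only [if_neg hk]; exact hrel k
    · simp only [stepA, stepB, ← hg, hA, hB]
      rw [PySem.Dict.items_insert_of_not_contains _ _ hcon, msum_append]
      simp [msum, pyDiffsA_short [i] (by simp), hacc]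
  | some l =>
    obtain ⟨j, hB, hlast⟩ : ∃ j, dB.get? g = some j ∧ l.getLast? = some j := by
      cases hB : dB.get? g with
      | none => rw [hA, hB] at hrg; exact absurd hrg (by simp [relLast])
      | some j => rw [hA, hB] at hrg; exact ⟨j, rfl, hrg⟩
    have hcon : dA.contains g = true := by
      rw [PySem.Dict.contains_eq_isSome_get?, hA]; rfl
    refine ⟨?_, ?_, ?_⟩
    · exact PySem.Dict.nodup_keys_insert _ _ _ hnd
    · intro k
      simp only [stepA, stepB, ← hg, hA, hB]
      rw [PySem.Dict.get?_insert, PySem.Dict.get?_insert]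
      by_cases hk : k = g
      · simp [hk, relLast]
      · simp only [if_neg hk]; exact hrel k
    · simp only [stepA, stepB, ← hg, hA, hB]
      rw [PySem.Dict.items_insert_of_contains _ _ hcon]
      have hmem : (g, l) ∈ dA.items := PySem.Dict.mem_items_of_get?_eq_some dA hA
      have hup := msum_update dA.items g l (l ++ [i]) hnd hmem
      rw [pyDiffsA_append l j i hlast] at hup
      have : msum (dA.items.map (fun p => if (p.1 == g) = true then (g, l ++ [i]) else p))
          = msum dA.items + ({i - j} : Multiset Int) := by
        have h2 : msum dA.items + ((pyDiffsA l ++ [i - j] : List Int) : Multiset Int)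
            = msum dA.items + ({i - j} : Multiset Int) + (pyDiffsA l : Multiset Int) := by
          rw [← Multiset.coe_add]
          abel
        rw [h2] at hup
        exact add_right_cancel hup
      rw [this, ← hacc, ← Multiset.coe_singleton, Multiset.coe_add]

theorem inv_foldl (cs : List Char) (n : Int) (L : List Int) :
    ∀ dA dB acc, LoopInv dA dB acc →
      LoopInv (L.foldl (stepA cs n) dA) (L.foldl (stepB cs n) (dB, acc)).1
        (L.foldl (stepB cs n) (dB, acc)).2 := by
  induction L with
  | nil => intro dA dB acc h; exact h
  | cons i t ih =>
    intro dA dB acc h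
    have h1 := inv_step cs n dA dB acc i h
    simpa using ih _ _ _ h1

theorem foldl_append_eq_flatten (L : List (List Int)) :
    ∀ init, L.foldl (fun acc v => acc ++ v) init = init ++ L.flatten := by
  induction L with
  | nil => simp
  | cons v t ih => intro init; simp [ih, List.append_assoc]

-- A's second pass (fresh distinct keys): items = filtered, mapped items of the first pass
theorem items_filter_fold (l : List (List Char × List Int)) :
    ∀ d : PySem.Dict (List Char) (List Int), (l.map Prod.fst).Nodup →
      (∀ p ∈ l, d.contains p.1 = false) →
      (l.foldl (fun d p => if 1 < p.2.length then d.insert p.1 (pyDiffsA p.2) else d) d).items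
        = d.items ++ (l.filter (fun p => 1 < p.2.length)).map (fun p => (p.1, pyDiffsA p.2)) := by
  induction l with
  | nil => intro d _ _; simp
  | cons p t ih =>
    intro d hnd hfresh
    simp only [List.map_cons, List.nodup_cons] at hnd
    have hfp : d.contains p.1 = false := hfresh p (List.mem_cons_self)
    by_cases hc : 1 < p.2.length
    · simp only [List.foldl_cons, if_pos hc]
      rw [ih _ hnd.2 (fun q hq => by
        rw [PySem.Dict.contains_insert]
        have : q.1 ≠ p.1 := fun he => hnd.1 (List.mem_map.mpr ⟨q, hq, he⟩)
        simp [this, hfresh q (List.mem_cons_of_mem _ hq)])]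
      rw [PySem.Dict.items_insert_of_not_contains _ _ hfp]
      simp [hc]
    · simp only [List.foldl_cons, if_neg hc]
      rw [ih _ hnd.2 (fun q hq => hfresh q (List.mem_cons_of_mem _ hq))]
      simp [hc]

theorem coe_flatten_diffs (its : List (List Char × List Int)) :
    ((((its.map (fun p => pyDiffsA p.2)).flatten : List Int)) : Multiset Int) = msum its := by
  induction its with
  | nil => rfl
  | cons p t ih =>
    simp only [List.map_cons, List.flatten_cons, ← Multiset.coe_add, msum, List.sum_cons]
    simp only [msum] at ih
    rw [ih]

theorem msum_filter (its : List (List Char × List Int)) :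
    msum (its.filter (fun p => 1 < p.2.length)) = msum its := by
  induction its with
  | nil => rfl
  | cons p t ih =>
    by_cases hc : 1 < p.2.length
    · simp [hc, msum, List.sum_cons] at ih ⊢; rw [ih]
    · simp only [List.filter_cons, decide_eq_true_eq, if_neg hc]
      have : pyDiffsA p.2 = [] := pyDiffsA_short _ (by omega)
      simp [msum, this] at ih ⊢
      exact ih

-- ===== VERDICT (by name: the statement is the Claim_ definition above) =====
theorem find_ngrams_distances_spec : Claim_equal_find_ngrams_distances := by
  intro text n _
  unfold Spec_find_ngrams_distances find_ngrams_distances find_ngrams_distances_alt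
  dsimp only
  set cs := text.toList
  set L := PySem.List.pyRange 0 ((cs.length : Int) - n + 1) with hL
  have hinv := inv_foldl cs n L PySem.Dict.empty PySem.Dict.empty []
    ⟨by simp [PySem.Dict.keys_empty], fun k => by simp [PySem.Dict.get?_empty, relLast],
     by simp [msum, PySem.Dict.empty]⟩
  obtain ⟨hnd, -, hacc⟩ := hinv
  set ngrams := L.foldl (stepA cs n) PySem.Dict.empty with hng
  rw [PySem.List.sorted_id_eq_sorted_id_iff_perm, ← Multiset.coe_eq_coe,
      foldl_append_eq_flatten, List.nil_append]
  have hitems := items_filter_fold ngrams.items PySem.Dict.empty hnd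
    (fun p _ => by simp [PySem.Dict.contains_empty])
  have hvals : (ngrams.items.foldl
      (fun d p => if 1 < p.2.length then d.insert p.1 (pyDiffsA p.2) else d)
      PySem.Dict.empty).values
      = (ngrams.items.filter (fun p => 1 < p.2.length)).map (fun p => pyDiffsA p.2) := by
    simp only [PySem.Dict.values, hitems]
    simp [PySem.Dict.empty, List.map_map]
  rw [hvals, coe_flatten_diffs, msum_filter, ← hacc]
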